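-- pv_equiv track=rewrite | github.com/cs0317/stagehand | auto_verbs/common/regen_signatures.py | extract_dataclass_blocks
-- ===== SOURCE A (Python) =====
-- def extract_dataclass_blocks(lines: list[str]) -> list[str]:
--     """Extract all @dataclass(frozen=True) class blocks as strings."""
--     blocks = []
--     i = 0
--     while i < len(lines):
--         stripped = lines[i].strip()
--         if stripped in ("@dataclass(frozen=True)", "@dataclass(frozen = True)"):
--             block_lines = [lines[i].rstrip()]
--             i += 1
--             # class line
--             while i < len(lines) and not lines[i].startswith("class "):
--                 i += 1
--             if i >= len(lines):
--                 break
--             block_lines.append(lines[i].rstrip())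
--             i += 1
--             # field lines (indented)
--             while i < len(lines):
--                 line = lines[i]
--                 if line.strip() == "" or (line and not line[0].isspace()):
--                     break
--                 # Skip comment lines inside class body
--                 if line.strip().startswith("#"):
--                     i += 1
--                     continue
--                 block_lines.append(line.rstrip())
--                 i += 1
--             blocks.append("\n".join(block_lines))
--         else:
--             i += 1
--     return blocks
-- ===== SOURCE B (Python) =====
-- def extract_dataclass_blocks(lines: list[str]) -> list[str]:
--     """Extract all @dataclass(frozen=True) class blocks as strings.
--
--     Single flat pass with an explicit state machine instead of nested index loops.
--     """
--     OUTSIDE, SEEKING_CLASS, IN_BODY = 0, 1, 2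
--     blocks = []
--     state = OUTSIDE
--     buf = []
--     for line in lines:
--         if state == IN_BODY:
--             s = line.strip()
--             if s == "" or not line[0].isspace():
--                 blocks.append("\n".join(buf))
--                 state = OUTSIDE
--                 # fall through: this very line may start a new block
--             elif s.startswith("#"):
--                 continue
--             else:
--                 buf.append(line.rstrip())
--                 continue
--         if state == SEEKING_CLASS:
--             if line.startswith("class "):
--                 buf.append(line.rstrip())
--                 state = IN_BODY
--             continue
--         # OUTSIDE
--         if line.strip() in ("@dataclass(frozen=True)", "@dataclass(frozen = True)"):
--             buf = [line.rstrip()]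
--             state = SEEKING_CLASS
--     if state == IN_BODY:
--         blocks.append("\n".join(buf))
--     return blocks
-- ===== Notes on version B (the rewrite author's own statement) =====
-- stated objective: simpler
-- what changed: Replaces A's nested index-driven while loops (with break/continue across them) by one flat pass over the lines with an explicit OUTSIDE/SEEKING_CLASS/IN_BODY state variable and a running block buffer, emitting on exit from IN_BODY and at EOF.
import Mathlib
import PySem

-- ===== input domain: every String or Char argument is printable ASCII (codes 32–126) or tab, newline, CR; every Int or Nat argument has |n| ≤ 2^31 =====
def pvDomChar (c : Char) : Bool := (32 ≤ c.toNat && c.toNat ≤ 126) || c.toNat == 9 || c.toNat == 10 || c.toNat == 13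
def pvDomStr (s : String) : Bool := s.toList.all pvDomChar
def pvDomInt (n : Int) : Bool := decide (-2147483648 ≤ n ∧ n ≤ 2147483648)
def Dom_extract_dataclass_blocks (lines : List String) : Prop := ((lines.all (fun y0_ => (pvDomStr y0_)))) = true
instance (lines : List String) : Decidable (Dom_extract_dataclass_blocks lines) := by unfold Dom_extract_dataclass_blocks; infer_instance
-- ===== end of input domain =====

-- B replaces A's nested index-driven while loops by one flat pass (a fold) with an
-- explicit OUTSIDE/SEEKING_CLASS/IN_BODY state and a running buffer (objective: simpler).

-- ===== PORT A =====
-- shared small helpers (both Pythons compute these same tests/values)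
def pvIsDec (l : String) : Bool :=
  PySem.Str.strip l == "@dataclass(frozen=True)" || PySem.Str.strip l == "@dataclass(frozen = True)"

def pvHeadSpace (l : String) : Bool :=
  match l.toList with
  | [] => false
  | c :: _ => PySem.Chars.isspace c

mutual
-- outer 'while i < len(lines)' loop of A
def pvAOuter (blocks : List String) : List String → List String
  | [] => blocks
  | l :: rest =>
    if pvIsDec l then pvASeek blocks [PySem.Str.rstrip l] rest
    else pvAOuter blocks rest
-- inner 'while … not lines[i].startswith("class ")' loop; [] = the 'if i >= len(lines): break'
def pvASeek (blocks : List String) (buf : List String) : List String → List String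
  | [] => blocks
  | l :: rest =>
    if PySem.Str.startswith l "class " then pvABody blocks (buf ++ [PySem.Str.rstrip l]) rest
    else pvASeek blocks buf rest
-- inner field-lines loop; its 'break' returns to the top of the outer loop WITHOUT advancing i,
-- so the outer loop's decorator test on that same line is inlined here
def pvABody (blocks : List String) (buf : List String) : List String → List String
  | [] => blocks ++ [PySem.Str.join "\n" buf]
  | l :: rest =>
    if PySem.Str.strip l == "" || (decide (l ≠ "") && !pvHeadSpace l) then
      if pvIsDec l then pvASeek (blocks ++ [PySem.Str.join "\n" buf]) [PySem.Str.rstrip l] rest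
      else pvAOuter (blocks ++ [PySem.Str.join "\n" buf]) rest
    else if PySem.Str.startswith (PySem.Str.strip l) "#" then pvABody blocks buf rest
    else pvABody blocks (buf ++ [PySem.Str.rstrip l]) rest
end

def extract_dataclass_blocks (lines : List String) : List String := pvAOuter [] lines

-- ===== PORT B =====
inductive PvSt where
  | outside : PvSt
  | seeking : List String → PvSt          -- SEEKING_CLASS with its buffer
  | inBody  : List String → PvSt          -- IN_BODY with its buffer
deriving Repr, DecidableEq

-- one iteration of B's 'for line in lines' loop
def pvBStep (acc : List String × PvSt) (l : String) : List String × PvSt :=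
  match acc with
  | (blocks, PvSt.inBody buf) =>
    if PySem.Str.strip l == "" || !pvHeadSpace l then
      -- emit, back to OUTSIDE, and fall through to the OUTSIDE decorator test on this line
      if pvIsDec l then (blocks ++ [PySem.Str.join "\n" buf], PvSt.seeking [PySem.Str.rstrip l])
      else (blocks ++ [PySem.Str.join "\n" buf], PvSt.outside)
    else if PySem.Str.startswith (PySem.Str.strip l) "#" then (blocks, PvSt.inBody buf)
    else (blocks, PvSt.inBody (buf ++ [PySem.Str.rstrip l]))
  | (blocks, PvSt.seeking buf) =>
    if PySem.Str.startswith l "class " then (blocks, PvSt.inBody (buf ++ [PySem.Str.rstrip l]))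
    else (blocks, PvSt.seeking buf)
  | (blocks, PvSt.outside) =>
    if pvIsDec l then (blocks, PvSt.seeking [PySem.Str.rstrip l])
    else (blocks, PvSt.outside)

-- B's final 'if state == IN_BODY: blocks.append(...)'
def pvBFinal : List String × PvSt → List String
  | (blocks, PvSt.inBody buf) => blocks ++ [PySem.Str.join "\n" buf]
  | (blocks, _) => blocks

def extract_dataclass_blocks_alt (lines : List String) : List String :=
  pvBFinal (lines.foldl pvBStep ([], PvSt.outside))

-- ===== PRECONDITION & SPEC =====
def Spec_extract_dataclass_blocks (lines : List String) (out : List String) : Prop := out = extract_dataclass_blocks_alt lines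
instance (lines : List String) (out : List String) : Decidable (Spec_extract_dataclass_blocks lines out) := by unfold Spec_extract_dataclass_blocks; infer_instance

-- ===== CLAIM (what is proved, stated in full; the proofs are below) =====
def Claim_equal_extract_dataclass_blocks : Prop := ∀ (lines : List String), Dom_extract_dataclass_blocks lines → Spec_extract_dataclass_blocks lines (extract_dataclass_blocks lines)

-- ===== LEMMAS AND PROOFS =====

-- interpret a B-state as the corresponding A-side loop
def pvRunA (blocks : List String) (st : PvSt) (lines : List String) : List String :=
  match st with
  | PvSt.outside => pvAOuter blocks lines
  | PvSt.seeking buf => pvASeek blocks buf lines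
  | PvSt.inBody buf => pvABody blocks buf lines

theorem pvStrip_empty : PySem.Str.strip "" = "" := by decide

-- A's break test '(line and not line[0].isspace())' equals B's 'not line[0].isspace()' within the disjunction
theorem pvBreakCond_eq (l : String) :
    (PySem.Str.strip l == "" || (decide (l ≠ "") && !pvHeadSpace l)) =
    (PySem.Str.strip l == "" || !pvHeadSpace l) := by
  by_cases h : l = ""
  · subst h; simp [pvStrip_empty]
  · simp [h]

theorem pvKey (lines : List String) : ∀ (blocks : List String) (st : PvSt),
    pvBFinal (lines.foldl pvBStep (blocks, st)) = pvRunA blocks st lines := by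
  induction lines with
  | nil =>
    intro blocks st
    cases st <;> simp [pvRunA, pvBFinal, pvAOuter, pvASeek, pvABody]
  | cons l rest ih =>
    intro blocks st
    cases st with
    | outside =>
      simp only [List.foldl_cons, pvBStep, pvRunA, pvAOuter]
      split_ifs <;> simp [ih, pvRunA]
    | seeking buf =>
      simp only [List.foldl_cons, pvBStep, pvRunA, pvASeek]
      split_ifs <;> simp [ih, pvRunA]
    | inBody buf =>
      simp only [List.foldl_cons, pvBStep, pvRunA, pvABody, pvBreakCond_eq]
      split_ifs <;> simp_all [pvRunA]

-- ===== VERDICT (by name: the statement is the Claim_ definition above) =====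
theorem extract_dataclass_blocks_spec : Claim_equal_extract_dataclass_blocks := by
  intro lines _
  unfold Spec_extract_dataclass_blocks extract_dataclass_blocks extract_dataclass_blocks_alt
  exact (pvKey lines [] PvSt.outside).symm
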